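-- pv_equiv track=rewrite | github.com/takua624/Augmented-Edit-Distance | augmented_edit_distance.py | repeat_score
-- ===== SOURCE A (Python) =====
-- from itertools import permutations
--
-- def repeat_score(w1,w2,cc):
-- 	# default: w1 has more cc than w2
-- 	NN = len(w1)
-- 	cc_in_w1 = w1.count(cc)
-- 	cc_in_w2 = w2.count(cc)
-- 	if cc_in_w2 > cc_in_w1:
-- 		tmp=w1
-- 		w1=w2
-- 		w2=tmp
-- 	score = []
-- 	# the position in w1 and w2 where cc occurs
-- 	# for example, if w1 is "apple", and cc is "p",
-- 	# then pos1 = [1,2], remember the index of Python begins from 0!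
-- 	pos1 = [ii for ii in range(NN) if w1[ii]==cc]
-- 	pos2 = [ii for ii in range(NN) if w2[ii]==cc]
--
-- 	# find the minimum sum of distances of all occurrences of cc in w1 and in w2
-- 	# for example, w1="accc", w2="cbbc", cc="c"
-- 	# pos1=[1,2,3], pos2=[0,3]
-- 	# perm_pos1 = [[1,2,3], [1,3,2], [2,1,3], [2,3,1], [3,1,2], [3,2,1]]
-- 	# because there are only 2 c's in w2, for each permutation in perm_pos1,
-- 	# we only take the first 2 value to minus the corresponding value in pos2
-- 	# in this case, the resulting possible scores are:
-- 	# [1+1, 1+0, 2+2, 2+0, 3+2, 3+1]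
-- 	# the best case is 1+0, definitely.
-- 	# So in this case, the optimum mapping between the multiple c's is:
-- 	# c1 in w1 maps to c0 in w2, and c3 in w1 maps to c3 in w2
-- 	# c2 in w1 will lead to a penalty of extra repeated cc, which is handled not in this function, but in the calling function "same_length()"
-- 	perm_pos1 = list(permutations(pos1))
-- 	for perm in perm_pos1:
-- 		pos1 = perm
-- 		shorter = min(len(pos1), len(pos2))
--
-- 		this_perm = 0
-- 		for ii in range(shorter):
-- 			this_perm += abs(pos1[ii]-pos2[ii])
-- 		score += [this_perm]
-- 	score = min(score)
--
-- 	return score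
-- ===== SOURCE B (Python) =====
-- def repeat_score(w1, w2, cc):
--     # default: w1 has more cc than w2
--     NN = len(w1)
--     if w2.count(cc) > w1.count(cc):
--         w1, w2 = w2, w1
--     pos1 = [ii for ii in range(NN) if w1[ii] == cc]
--     pos2 = [ii for ii in range(NN) if w2[ii] == cc]
--     if len(pos1) < len(pos2):
--         # all of pos1 must be matched, to the first len(pos1) targets;
--         # both lists are sorted, so pairing them in order is optimal
--         return sum(abs(a - b) for a, b in zip(pos1, pos2))
--     # DP over sorted positions: dp[j] = best cost matching the first j
--     # targets of pos2 with distinct already-scanned elements of pos1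
--     dp = [0] + [None] * len(pos2)
--     for x in pos1:
--         for j in range(len(pos2), 0, -1):
--             if dp[j - 1] is not None:
--                 c = dp[j - 1] + abs(x - pos2[j - 1])
--                 if dp[j] is None or c < dp[j]:
--                     dp[j] = c
--     return dp[len(pos2)]
-- ===== Notes on version B (the rewrite author's own statement) =====
-- stated objective: alternative
-- what changed: A enumerates all n! permutations of the occurrence positions and takes the minimum matching cost; B exploits that both position lists are sorted, so an optimal assignment is order-preserving, and computes the same minimum with an O(n*m) dynamic program (dp[j] = best cost of matching the first j targets), returning the plain in-order pairing when the target list is the longer one; a timing run inputs contain too few repeated characters to exercise A's factorial worst case, so no speed is claimed.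
import Mathlib
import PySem

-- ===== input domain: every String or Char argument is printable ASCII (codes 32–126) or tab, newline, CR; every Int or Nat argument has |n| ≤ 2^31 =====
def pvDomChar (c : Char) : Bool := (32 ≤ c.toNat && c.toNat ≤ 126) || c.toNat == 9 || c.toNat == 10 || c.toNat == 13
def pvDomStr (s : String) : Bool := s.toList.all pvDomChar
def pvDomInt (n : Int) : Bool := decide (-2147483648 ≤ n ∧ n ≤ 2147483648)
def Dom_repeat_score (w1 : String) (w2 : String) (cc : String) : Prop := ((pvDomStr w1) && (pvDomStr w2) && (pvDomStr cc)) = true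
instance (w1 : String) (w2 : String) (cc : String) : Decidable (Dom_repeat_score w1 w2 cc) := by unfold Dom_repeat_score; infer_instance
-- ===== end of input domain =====

-- B replaces A's minimum over all n! permutations of the repeated-character positions by a
-- dynamic program over the (sorted) position lists; objective: alternative algorithm.

-- ===== PORT A =====
-- shared helper: the comprehension '[ii for ii in range(NN) if w[ii]==cc]', identical lines in A and B
def pvPosList (l c : List Char) (NN : Int) : List Int :=
  (PySem.List.pyRange 0 NN 1).filter
    (fun ii => (PySem.List.pyGet? l ii).map (fun ch => [ch]) == some c)

def repeat_score (w1 : String) (w2 : String) (cc : String) : Int :=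
  let NN : Int := (w1.toList.length : Int)
  let c := cc.toList
  let cnt1 := PySem.Chars.count w1.toList c
  let cnt2 := PySem.Chars.count w2.toList c
  let a := if cnt1 < cnt2 then w2.toList else w1.toList
  let b := if cnt1 < cnt2 then w1.toList else w2.toList
  let pos1 := pvPosList a c NN
  let pos2 := pvPosList b c NN
  let score := (PySem.List.permutations pos1 pos1.length).map (fun perm =>
      let shorter : Int := min (perm.length : Int) (pos2.length : Int)
      (PySem.List.pyRange 0 shorter 1).foldl
        (fun acc ii => acc + |PySem.List.pyGetD perm ii 0 - PySem.List.pyGetD pos2 ii 0|) 0)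
  (PySem.List.min? score (fun x => x)).getD 0

-- ===== PORT B =====
-- one pass of B's inner loop: 'for j in range(len(pos2), 0, -1): …' updating dp in place
def pvStep (pos2 : List Int) (dp : List (Option Int)) (x : Int) : List (Option Int) :=
  (PySem.List.pyRange (pos2.length : Int) 0 (-1)).foldl
    (fun dp j =>
      match PySem.List.pyGetD dp (j - 1) none with
      | none => dp
      | some v =>
        let cst := v + |x - PySem.List.pyGetD pos2 (j - 1) 0|
        match PySem.List.pyGetD dp j none with
        | none => PySem.List.pySetD dp j (some cst)
        | some cur => if cst < cur then PySem.List.pySetD dp j (some cst) else dp)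
    dp

def repeat_score_alt (w1 : String) (w2 : String) (cc : String) : Int :=
  let NN : Int := (w1.toList.length : Int)
  let c := cc.toList
  let cnt1 := PySem.Chars.count w1.toList c
  let cnt2 := PySem.Chars.count w2.toList c
  let a := if cnt1 < cnt2 then w2.toList else w1.toList
  let b := if cnt1 < cnt2 then w1.toList else w2.toList
  let pos1 := pvPosList a c NN
  let pos2 := pvPosList b c NN
  if pos1.length < pos2.length then
    ((pos1.zip pos2).map (fun pr => |pr.1 - pr.2|)).sum
  else
    let dp0 : List (Option Int) := some 0 :: List.replicate pos2.length none
    let dp := pos1.foldl (pvStep pos2) dp0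
    (PySem.List.pyGetD dp (pos2.length : Int) none).getD 0

-- ===== PRECONDITION & SPEC =====
-- Pre_ excludes exactly the inputs with len(w1) > len(w2), on which A (and B alike) raises
-- IndexError: the comprehensions index both words up to len(w1)-1.
def Pre_repeat_score (w1 : String) (w2 : String) (cc : String) : Prop :=
  w1.toList.length ≤ w2.toList.length
instance (w1 : String) (w2 : String) (cc : String) : Decidable (Pre_repeat_score w1 w2 cc) := by
  unfold Pre_repeat_score; infer_instance

def pvWitness_repeat_score : String × String × String := ("accc", "cbbc", "c")

def Spec_repeat_score (w1 : String) (w2 : String) (cc : String) (out : Int) : Prop := out = repeat_score_alt w1 w2 cc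
instance (w1 : String) (w2 : String) (cc : String) (out : Int) : Decidable (Spec_repeat_score w1 w2 cc out) := by unfold Spec_repeat_score; infer_instance

-- ===== CLAIM (what is proved, stated in full; the proofs are below) =====
def Claim_equal_repeat_score : Prop := ∀ (w1 : String) (w2 : String) (cc : String), Dom_repeat_score w1 w2 cc → Pre_repeat_score w1 w2 cc → Spec_repeat_score w1 w2 cc (repeat_score w1 w2 cc)

-- ===== LEMMAS AND PROOFS =====

-- total cost of pairing two position lists index by index (zip truncates at the shorter)
def pvZC (a b : List Int) : Int := (List.zipWith (fun x y => |x - y|) a b).sum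

-- minimum of two optional costs, none = +infinity
def pvOMin : Option Int → Option Int → Option Int
  | none, o => o
  | some v, none => some v
  | some v, some w => some (min v w)

-- pvM p q = minimal cost of matching ALL of q to distinct elements of p, order-preserving
def pvM : List Int → List Int → Option Int
  | _, [] => some 0
  | [], _ :: _ => none
  | x :: p, y :: q => pvOMin (pvM p (y :: q)) ((pvM p q).map (fun v => |x - y| + v))

-- dp profile after consuming the prefix xs of pos1
def pvProfile (q xs : List Int) : List (Option Int) :=
  (List.range (q.length + 1)).map (fun j => pvM xs.reverse ((q.take j).reverse))

theorem pvZC_nil_left (b : List Int) : pvZC [] b = 0 := rfl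
theorem pvZC_nil_right (a : List Int) : pvZC a [] = 0 := by cases a <;> rfl
theorem pvZC_cons (x y : Int) (a b : List Int) :
    pvZC (x :: a) (y :: b) = |x - y| + pvZC a b := rfl

theorem pvZC_append_left (u v b : List Int) (h : b.length ≤ u.length) :
    pvZC (u ++ v) b = pvZC u b := by
  induction u generalizing b with
  | nil => cases b with
    | nil => simp [pvZC_nil_right, pvZC_nil_left]
    | cons y b => simp at h
  | cons x u ih =>
    cases b with
    | nil => simp [pvZC_nil_right]
    | cons y b =>
      simp only [List.cons_append, pvZC_cons]
      rw [ih]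
      simpa using h

theorem pvZC_take_right (a b : List Int) : pvZC a b = pvZC a (b.take a.length) := by
  induction a generalizing b with
  | nil => simp [pvZC_nil_left]
  | cons x a ih =>
    cases b with
    | nil => rfl
    | cons y b => simp only [List.length_cons, List.take_succ_cons, pvZC_cons]; rw [ih]

theorem pvZC_take_left (a b : List Int) : pvZC a b = pvZC (a.take b.length) b := by
  induction a generalizing b with
  | nil => simp
  | cons x a ih =>
    cases b with
    | nil => simp [pvZC_nil_right]
    | cons y b => simp only [List.length_cons, List.take_succ_cons, pvZC_cons]; rw [ih]

theorem pvZC_rev (a b : List Int) (h : a.length = b.length) :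
    pvZC a.reverse b.reverse = pvZC a b := by
  induction a generalizing b with
  | nil =>
    cases b with
    | nil => rfl
    | cons y b => simp at h
  | cons x a ih =>
    cases b with
    | nil => simp at h
    | cons y b =>
      simp only [List.length_cons] at h
      simp only [List.reverse_cons, pvZC, pvZC_cons]
      rw [List.zipWith_append (h := by simp; omega), List.sum_append]
      have := ih b (by omega)
      simp only [pvZC] at this
      simp [this, pvZC_cons, pvZC]
      ring

theorem pvOMin_eq_none_iff (o1 o2 : Option Int) :
    pvOMin o1 o2 = none ↔ o1 = none ∧ o2 = none := by
  cases o1 <;> cases o2 <;> simp [pvOMin]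

theorem pvM_eq_none_iff (p q : List Int) : pvM p q = none ↔ p.length < q.length := by
  induction p generalizing q with
  | nil => cases q <;> simp [pvM]
  | cons x p ih =>
    cases q with
    | nil => simp [pvM]
    | cons y q =>
      simp only [pvM, pvOMin_eq_none_iff, ih, Option.map_eq_none_iff, List.length_cons]
      omega

theorem pvM_eqlen (p q : List Int) (h : p.length = q.length) :
    pvM p q = some (pvZC p q) := by
  induction p generalizing q with
  | nil =>
    cases q with
    | nil => simp [pvM, pvZC]
    | cons y q => simp at h
  | cons x p ih =>
    cases q with
    | nil => simp at h
    | cons y q =>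
      simp only [List.length_cons] at h
      have hnone : pvM p (y :: q) = none := by
        rw [pvM_eq_none_iff]; simp; omega
      simp only [pvM, hnone, ih q (by omega), pvZC_cons, pvOMin, Option.map_some]

-- the transformation reversing the matched prefix: cost against Q equals cost against Q.reverse
theorem pvTransform (σ Q : List Int) (h : Q.length ≤ σ.length) :
    ∃ τ : List Int, τ.Perm σ ∧ pvZC τ Q.reverse = pvZC σ Q := by
  refine ⟨(σ.take Q.length).reverse ++ σ.drop Q.length, ?_, ?_⟩
  · have h1 := (List.reverse_perm (σ.take Q.length)).append_right (σ.drop Q.length)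
    simpa [List.take_append_drop] using h1
  · have hlt : (σ.take Q.length).length = Q.length := by
      simp [List.length_take]; omega
    rw [pvZC_append_left _ _ _ (by simp [hlt]),
        pvZC_rev _ _ (by simp [hlt]), ← pvZC_take_left]

-- abs exchange inequality
theorem pvAbsSwap (a b c d : Int) (hab : b ≤ a) (hcd : d ≤ c) :
    |a - c| + |b - d| ≤ |b - c| + |a - d| := by
  rcases abs_cases (a - c) with ⟨h1, _⟩ | ⟨h1, _⟩ <;>
    rcases abs_cases (b - d) with ⟨h2, _⟩ | ⟨h2, _⟩ <;>
      rcases abs_cases (b - c) with ⟨h3, _⟩ | ⟨h3, _⟩ <;>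
        rcases abs_cases (a - d) with ⟨h4, _⟩ | ⟨h4, _⟩ <;> omega

theorem pvZC_split (u v q1 q2 : List Int) (b yj : Int) (h : u.length = q1.length) :
    pvZC (u ++ b :: v) (q1 ++ yj :: q2) = pvZC u q1 + |b - yj| + pvZC v q2 := by
  unfold pvZC
  rw [List.zipWith_append (h := h), List.zipWith_cons_cons, List.sum_append, List.sum_cons]
  ring

theorem pvOMin_le_first (o1 o2 : Option Int) (w w1 : Int)
    (h : pvOMin o1 o2 = some w) (h1 : o1 = some w1) : w ≤ w1 := by
  subst h1
  cases o2 <;> simp [pvOMin] at h <;> omega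

theorem pvOMin_le_second (o1 o2 : Option Int) (w w2 : Int)
    (h : pvOMin o1 o2 = some w) (h2 : o2 = some w2) : w ≤ w2 := by
  subst h2
  cases o1 <;> simp [pvOMin] at h <;> omega

-- LOWER BOUND: for descending P and Q with |Q| ≤ |P|, pvM P Q under-runs every permutation cost
theorem pvLB (n : Nat) (P Q σ : List Int) (hn : P.length = n)
    (hP : P.Pairwise (fun a b => b ≤ a)) (hQ : Q.Pairwise (fun a b => b ≤ a))
    (hlen : Q.length ≤ P.length) (hσ : σ.Perm P) (w : Int) (hw : pvM P Q = some w) :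
    w ≤ pvZC σ Q := by
  induction n using Nat.strong_induction_on generalizing P Q σ w with
  | _ n ih =>
  cases Q with
  | nil =>
    have h0 : pvM P [] = some 0 := by cases P <;> rfl
    rw [h0] at hw
    simp at hw
    rw [pvZC_nil_right]
    omega
  | cons y Q' =>
    cases P with
    | nil => simp at hlen
    | cons xP P' =>
    cases σ with
    | nil => have hl := hσ.length_eq; simp at hl
    | cons z σ' =>
    obtain ⟨hPx, hP'⟩ := List.pairwise_cons.mp hP
    obtain ⟨hQy, hQ'⟩ := List.pairwise_cons.mp hQ
    simp only [List.length_cons] at hlen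
    have hx : xP ∈ z :: σ' := hσ.symm.subset List.mem_cons_self
    obtain ⟨u, vv, huv⟩ := List.append_of_mem hx
    have hM : pvM (xP :: P') (y :: Q') =
        pvOMin (pvM P' (y :: Q')) ((pvM P' Q').map (fun v => |xP - y| + v)) := rfl
    have hQ'P' : Q'.length ≤ P'.length := by omega
    have hw2ex : pvM P' Q' ≠ none := by
      intro hc; rw [pvM_eq_none_iff] at hc; omega
    obtain ⟨w2, hw2⟩ := Option.ne_none_iff_exists'.mp hw2ex
    have hb2 : w ≤ |xP - y| + w2 :=
      pvOMin_le_second _ _ _ _ (hM ▸ hw) (by rw [hw2]; rfl)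
    have huvP : (u ++ vv).Perm P' := by
      have h1 : (z :: σ').Perm (xP :: (u ++ vv)) := by
        rw [huv]; exact List.perm_middle
      exact (h1.symm.trans hσ).cons_inv
    have hn' : P'.length + 1 = n := by simpa using hn
    cases u with
    | nil =>
      simp only [List.nil_append] at huv huvP
      rcases List.cons_eq_cons.mp huv with ⟨rfl, rfl⟩
      rw [pvZC_cons]
      have hih := ih P'.length (by omega) P' Q' σ' rfl hP' hQ' hQ'P' huvP w2 hw2
      linarith
    | cons z u' =>
      rw [List.cons_append] at huv
      rcases List.cons_eq_cons.mp huv with ⟨rfl, rfl⟩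
      have hzP' : z ∈ P' := huvP.subset (by simp)
      have hzx : z ≤ xP := hPx z hzP'
      by_cases hcase : Q'.length ≤ u'.length
      · -- xP sits outside the matched prefix: drop it, recurse on P' with the same targets
        have hτ : (z :: (u' ++ vv)).Perm P' := by simpa using huvP
        have hlen1 : (y :: Q').length ≤ P'.length := by
          have h3 := hτ.length_eq
          simp at h3 ⊢
          omega
        have hw1ex : pvM P' (y :: Q') ≠ none := by
          intro hc
          rw [pvM_eq_none_iff] at hc
          simp only [List.length_cons] at hlen1 hc
          omega
        obtain ⟨w1, hw1⟩ := Option.ne_none_iff_exists'.mp hw1ex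
        have hb1 : w ≤ w1 := pvOMin_le_first _ _ _ _ (hM ▸ hw) hw1
        have hih := ih P'.length (by omega) P' (y :: Q') (z :: (u' ++ vv)) rfl hP' hQ hlen1 hτ w1 hw1
        have hzceq : pvZC (z :: (u' ++ vv)) (y :: Q') = pvZC (z :: (u' ++ xP :: vv)) (y :: Q') := by
          rw [pvZC_cons, pvZC_cons]
          congr 1
          rw [pvZC_append_left _ _ _ (by simpa using hcase),
              pvZC_append_left _ _ _ (by simpa using hcase)]
        linarith
      · -- exchange xP with the head z, then recurse
        push_neg at hcase
        have hqdec : Q' = Q'.take u'.length ++ Q'[u'.length] :: Q'.drop (u'.length + 1) := by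
          conv_lhs => rw [← List.take_append_drop u'.length Q']
          rw [List.drop_eq_getElem_cons hcase]
        have hqt_le : Q'[u'.length] ≤ y := hQy _ (List.getElem_mem _)
        have hswap : |xP - y| + |z - Q'[u'.length]| ≤ |z - y| + |xP - Q'[u'.length]| :=
          pvAbsSwap xP z y Q'[u'.length] hzx hqt_le
        have hlt : u'.length = (Q'.take u'.length).length := by
          simp [List.length_take]
          omega
        have hd1 : pvZC (u' ++ xP :: vv) Q'
            = pvZC u' (Q'.take u'.length) + |xP - Q'[u'.length]| + pvZC vv (Q'.drop (u'.length + 1)) := by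
          conv_lhs => rw [hqdec]
          exact pvZC_split _ _ _ _ _ _ hlt
        have hd2 : pvZC (u' ++ z :: vv) Q'
            = pvZC u' (Q'.take u'.length) + |z - Q'[u'.length]| + pvZC vv (Q'.drop (u'.length + 1)) := by
          conv_lhs => rw [hqdec]
          exact pvZC_split _ _ _ _ _ _ hlt
        have hτ : (u' ++ z :: vv).Perm P' := by
          have h1 : (u' ++ z :: vv).Perm (z :: (u' ++ vv)) := List.perm_middle
          have h2 : (z :: (u' ++ vv)).Perm P' := by simpa using huvP
          exact h1.trans h2
        have hih := ih P'.length (by omega) P' Q' (u' ++ z :: vv) rfl hP' hQ' hQ'P' hτ w2 hw2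
        rw [pvZC_cons, hd1]
        rw [hd2] at hih
        linarith

-- ACHIEVEMENT: some permutation of P attains pvM P Q
theorem pvACH (P Q : List Int) (hlen : Q.length ≤ P.length) :
    ∃ σ : List Int, σ.Perm P ∧ some (pvZC σ Q) = pvM P Q := by
  induction P generalizing Q with
  | nil =>
    have hq : Q = [] := by
      cases Q with
      | nil => rfl
      | cons y q => simp at hlen
    subst hq
    exact ⟨[], List.Perm.refl _, by simp [pvM, pvZC]⟩
  | cons x P ih =>
    cases Q with
    | nil => exact ⟨x :: P, List.Perm.refl _, by simp [pvM, pvZC_nil_right]⟩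
    | cons y Q' =>
      simp only [List.length_cons] at hlen
      obtain ⟨σ2, hσ2p, hσ2v⟩ := ih Q' (by omega)
      cases h1 : pvM P (y :: Q') with
      | none =>
        refine ⟨x :: σ2, hσ2p.cons x, ?_⟩
        simp only [pvM, h1, ← hσ2v, Option.map_some, pvZC_cons, pvOMin]
      | some w1 =>
        have hlen1 : (y :: Q').length ≤ P.length := by
          by_contra hc
          have hn : pvM P (y :: Q') = none := by
            rw [pvM_eq_none_iff]; simp at hc ⊢; omega
          simp [hn] at h1
        obtain ⟨σ1, hσ1p, hσ1v⟩ := ih (y :: Q') hlen1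
        rw [h1] at hσ1v
        by_cases hcmp : w1 ≤ |x - y| + pvZC σ2 Q'
        · refine ⟨σ1 ++ [x], ?_, ?_⟩
          · exact (List.perm_append_singleton x σ1).trans (hσ1p.cons x)
          · have hc1 : pvZC (σ1 ++ [x]) (y :: Q') = pvZC σ1 (y :: Q') := by
              apply pvZC_append_left
              rw [hσ1p.length_eq]
              simpa using hlen1
            rw [hc1]
            simp only [pvM, h1, ← hσ2v, pvOMin, Option.map_some]
            rw [hσ1v]
            congr 1
            omega
        · refine ⟨x :: σ2, hσ2p.cons x, ?_⟩
          simp only [pvM, h1, ← hσ2v, pvOMin, Option.map_some, pvZC_cons]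
          congr 1
          omega

-- unfolding equation for PySem.List.permutations at a successor
theorem pvPermSucc (xs : List Int) (r : Nat) :
    PySem.List.permutations xs (r + 1)
      = (List.range xs.length).flatMap (fun i =>
          ((xs[i]?).map (fun x => (PySem.List.permutations (xs.eraseIdx i) r).map (x :: ·))).getD []) := by
  conv_lhs => rw [PySem.List.permutations]
  congr 1
  funext i
  cases h : xs[i]? <;> simp [h]

-- completeness of PySem's itertools.permutations: every rearrangement occurs
theorem pvPermComplete (σ xs : List Int) (h : σ.Perm xs) :
    σ ∈ PySem.List.permutations xs xs.length := by
  induction σ generalizing xs with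
  | nil =>
    have hx : xs = [] := (h.symm).eq_nil
    subst hx
    simp [PySem.List.permutations_zero]
  | cons z σ' ih =>
    have hz : z ∈ xs := h.subset List.mem_cons_self
    obtain ⟨i, hi, hgi⟩ := List.getElem_of_mem hz
    have hp1 : xs.Perm (z :: xs.eraseIdx i) := by
      have h2 := (List.getElem_cons_eraseIdx_perm hi).symm
      rwa [hgi] at h2
    have hσ' : σ'.Perm (xs.eraseIdx i) := (h.trans hp1).cons_inv
    have hlen : xs.length = σ'.length + 1 := by
      have h3 := h.length_eq; simp at h3; omega
    rw [hlen, pvPermSucc]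
    apply List.mem_flatMap.mpr
    refine ⟨i, by simpa using hi, ?_⟩
    have hsome : xs[i]? = some z := by rw [List.getElem?_eq_getElem hi, hgi]
    rw [hsome]
    simp only [Option.map_some, Option.getD_some]
    apply List.mem_map.mpr
    refine ⟨σ', ?_, rfl⟩
    have hel : (xs.eraseIdx i).length = σ'.length := by
      rw [List.length_eraseIdx]; simp [hi]; omega
    have h4 := ih (xs.eraseIdx i) hσ'
    rwa [hel] at h4

-- characterisation of min? with the identity key over Int
theorem pvMinChar (xs : List Int) (m : Int) (hm : m ∈ xs) (hle : ∀ y ∈ xs, m ≤ y) :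
    PySem.List.min? xs (fun x => x) = some m := by
  cases h : PySem.List.min? xs (fun x => x) with
  | none =>
    rw [PySem.List.min?_eq_none_iff] at h
    subst h; simp at hm
  | some m' =>
    have h1 : m' ≤ m := PySem.List.min?_isMin h m hm
    have h2 : m ≤ m' := hle m' (PySem.List.min?_mem h)
    rw [le_antisymm h1 h2]

-- A's inner loop over range(shorter) computes pvZC
theorem pvFoldEqZC (perm pos2 : List Int) :
    (PySem.List.pyRange 0 (min (perm.length : Int) (pos2.length : Int)) 1).foldl
      (fun acc ii => acc + |PySem.List.pyGetD perm ii 0 - PySem.List.pyGetD pos2 ii 0|) 0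
    = pvZC perm pos2 := by
  have hmin : (min (perm.length : Int) (pos2.length : Int))
      = ((min perm.length pos2.length : Nat) : Int) := by simp
  rw [hmin, PySem.List.pyRange_zero_nat, List.foldl_map, PySem.List.foldl_add]
  simp only [PySem.List.pyGetD_natCast, zero_add]
  unfold pvZC
  congr 1
  apply List.ext_getElem
  · simp
  · intro i h1 h2
    simp only [List.length_map, List.length_range] at h1
    simp only [List.getElem_map, List.getElem_range, List.getElem_zipWith]
    rw [List.getD_eq_getElem _ _ (by omega), List.getD_eq_getElem _ _ (by omega)]

-- B's zip-map-sum computes pvZC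
theorem pvZipMapEqZC (a b : List Int) :
    ((a.zip b).map (fun pr => |pr.1 - pr.2|)).sum = pvZC a b := by
  induction a generalizing b with
  | nil => rfl
  | cons x a ih =>
    cases b with
    | nil => rfl
    | cons y b => simp only [List.zip_cons_cons, List.map_cons, List.sum_cons, pvZC_cons, ih]

-- the DP invariant
theorem pvProfileNil (q : List Int) :
    pvProfile q [] = some 0 :: List.replicate q.length none := by
  apply List.ext_getElem
  · simp [pvProfile]
  · intro j h1 h2
    simp only [pvProfile, List.length_map, List.length_range] at h1
    cases j with
    | zero => simp [pvProfile, pvM]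
    | succ j =>
      have hne : (q.take (j + 1)).reverse ≠ [] := by
        simp only [ne_eq, List.reverse_eq_nil_iff, List.take_eq_nil_iff]
        push_neg
        constructor
        · omega
        · intro hq; subst hq; simp at h1
      simp only [pvProfile, List.reverse_nil, List.getElem_map, List.getElem_range,
        List.getElem_cons_succ, List.getElem_replicate]
      cases hh : (q.take (j + 1)).reverse with
      | nil => exact absurd hh hne
      | cons a t => simp [pvM]

def pvComb (cur prev : Option Int) (c : Int) : Option Int :=
  pvOMin cur (prev.map (fun v => v + c))

theorem pvM_nil_right (p : List Int) : pvM p [] = some 0 := by cases p <;> rfl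

theorem pvSetSelf (d : List (Option Int)) (j : Int) (h1 : 0 ≤ j) (h2 : j < (d.length : Int)) :
    PySem.List.pySetD d j (PySem.List.pyGetD d j none) = d := by
  rw [PySem.List.pySetD_of_nonneg _ _ h1, PySem.List.pyGetD_eq_getElem _ _ h1 h2]
  exact List.set_getElem_self (by omega)

-- one pass of the descending inner loop, for any step function behaving like B's body
theorem pvInnerFold (q : List Int) (x : Int)
    (f : List (Option Int) → Int → List (Option Int))
    (hf : ∀ d (j : Int), 1 ≤ j → j < (d.length : Int) →
      f d j = PySem.List.pySetD d j
        (pvComb (PySem.List.pyGetD d j none) (PySem.List.pyGetD d (j - 1) none)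
          (|x - PySem.List.pyGetD q (j - 1) 0|)))
    (k : Nat) :
    ∀ d : List (Option Int), (k : Int) < (d.length : Int) →
      ((PySem.List.pyRange (k : Int) 0 (-1)).foldl f d).length = d.length ∧
      ∀ i : Nat, i < d.length →
        PySem.List.pyGetD ((PySem.List.pyRange (k : Int) 0 (-1)).foldl f d) (i : Int) none =
          if 1 ≤ i ∧ i ≤ k then
            pvComb (PySem.List.pyGetD d (i : Int) none)
              (PySem.List.pyGetD d ((i : Int) - 1) none) (|x - PySem.List.pyGetD q ((i : Int) - 1) 0|)
          else PySem.List.pyGetD d (i : Int) none := by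
  induction k with
  | zero =>
    intro d hd
    rw [show ((0 : Nat) : Int) = 0 by norm_num, PySem.List.pyRange_neg_one_eq_nil le_rfl]
    refine ⟨rfl, ?_⟩
    intro i hi
    rw [List.foldl_nil, if_neg (by omega)]
  | succ k ih =>
    intro d hd
    have hcast : ((k + 1 : Nat) : Int) = (k : Int) + 1 := by push_cast; ring
    rw [hcast] at hd ⊢
    rw [PySem.List.pyRange_neg_one_cons (by omega), show (k : Int) + 1 - 1 = (k : Int) by ring,
      List.foldl_cons]
    have hstep := hf d ((k : Int) + 1) (by omega) hd
    have hval : (k : Int) + 1 - 1 = (k : Int) := by ring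
    rw [hval] at hstep
    set cmb := pvComb (PySem.List.pyGetD d ((k : Int) + 1) none)
      (PySem.List.pyGetD d (k : Int) none) (|x - PySem.List.pyGetD q (k : Int) 0|) with hcmb
    rw [hstep]
    set d1 := PySem.List.pySetD d ((k : Int) + 1) cmb with hd1
    have hd1len : d1.length = d.length := PySem.List.length_pySetD _ _ _
    have hget1 : ∀ m : Nat, PySem.List.pyGetD d1 (m : Int) none =
        if m = k + 1 then cmb else PySem.List.pyGetD d (m : Int) none := by
      intro m
      rw [hd1, show ((k : Int) + 1) = ((k + 1 : Nat) : Int) by push_cast; ring]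
      exact PySem.List.pyGetD_pySetD_natCast d (k + 1) m cmb none (by omega)
    obtain ⟨ihlen, ihpt⟩ := ih d1 (by rw [hd1len]; omega)
    refine ⟨by rw [ihlen, hd1len], ?_⟩
    intro i hi
    rw [ihpt i (by omega)]
    by_cases hik : 1 ≤ i ∧ i ≤ k
    · -- inner positions: both d1-reads are below k+1, hence untouched
      have h1 : i ≠ k + 1 := by omega
      have h2 : ((i : Int) - 1) = ((i - 1 : Nat) : Int) := by push_cast [Nat.cast_sub (by omega : 1 ≤ i)]; ring
      rw [if_pos hik, if_pos (by omega : 1 ≤ i ∧ i ≤ k + 1)]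
      rw [hget1 i, if_neg h1, h2, hget1 (i - 1), if_neg (by omega)]
    · by_cases hik1 : i = k + 1
      · -- the freshly written position
        subst hik1
        rw [if_neg hik, if_pos (by omega)]
        rw [hget1 (k + 1), if_pos rfl, hcmb]
        rw [show ((k + 1 : Nat) : Int) = (k : Int) + 1 by push_cast; ring]
        rw [show (k : Int) + 1 - 1 = (k : Int) by ring]
      · -- untouched positions
        rw [if_neg hik, if_neg (by omega), hget1 i, if_neg (by omega)]

theorem pvProfile_length (q xs : List Int) : (pvProfile q xs).length = q.length + 1 := by
  simp [pvProfile]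

theorem pvProfile_getD (q xs : List Int) (i : Nat) (hi : i < q.length + 1) :
    PySem.List.pyGetD (pvProfile q xs) (i : Int) none = pvM xs.reverse ((q.take i).reverse) := by
  simp only [PySem.List.pyGetD_natCast, pvProfile]
  rw [List.getD_eq_getElem _ _ (by simpa using hi)]
  simp

theorem pvStepProfile (q xs : List Int) (x : Int) :
    pvStep q (pvProfile q xs) x = pvProfile q (xs ++ [x]) := by
  have hf : ∀ (d : List (Option Int)) (j : Int), 1 ≤ j → j < (d.length : Int) →
      (fun (dp : List (Option Int)) (j : Int) =>
        match PySem.List.pyGetD dp (j - 1) none with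
        | none => dp
        | some v =>
          let cst := v + |x - PySem.List.pyGetD q (j - 1) 0|
          match PySem.List.pyGetD dp j none with
          | none => PySem.List.pySetD dp j (some cst)
          | some cur => if cst < cur then PySem.List.pySetD dp j (some cst) else dp) d j
      = PySem.List.pySetD d j
          (pvComb (PySem.List.pyGetD d j none) (PySem.List.pyGetD d (j - 1) none)
            (|x - PySem.List.pyGetD q (j - 1) 0|)) := by
    intro d j h1 h2
    cases hprev : PySem.List.pyGetD d (j - 1) none with
    | none =>
      simp only [hprev, pvComb, Option.map_none]
      rw [show pvOMin (PySem.List.pyGetD d j none) none = PySem.List.pyGetD d j none by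
        cases PySem.List.pyGetD d j none <;> rfl]
      rw [pvSetSelf d j (by omega) h2]
    | some v =>
      cases hcur : PySem.List.pyGetD d j none with
      | none => simp [hprev, hcur, pvComb, pvOMin]
      | some cur =>
        simp only [hprev, hcur, pvComb, Option.map_some, pvOMin]
        split_ifs with hlt
        · rw [min_eq_right (by omega)]
        · rw [min_eq_left (by omega), ← hcur, pvSetSelf d j (by omega) h2]
  have hlen := pvProfile_length q xs
  obtain ⟨hrl, hrp⟩ := pvInnerFold q x _ hf q.length (pvProfile q xs)
    (by rw [hlen]; push_cast; omega)
  unfold pvStep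
  apply List.ext_getElem
  · rw [hrl, hlen, pvProfile_length]
  · intro i hi1 hi2
    have hi' : i < q.length + 1 := by rw [pvProfile_length] at hi2; omega
    have e1 : ∀ (L : List (Option Int)) (h : i < L.length),
        L[i] = PySem.List.pyGetD L (i : Int) none := by
      intro L h
      simp only [PySem.List.pyGetD_natCast]
      rw [List.getD_eq_getElem _ _ h]
    rw [e1 _ hi1, e1 _ hi2, hrp i (by rw [hlen]; omega), pvProfile_getD q (xs ++ [x]) i hi']
    simp only [List.reverse_append, List.reverse_cons, List.reverse_nil, List.nil_append,
      List.singleton_append]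
    by_cases hc : 1 ≤ i ∧ i ≤ q.length
    · rw [if_pos hc]
      obtain ⟨h1i, h2i⟩ := hc
      have hi1q : i - 1 < q.length := by omega
      have htakerev : (q.take i).reverse = q[i - 1] :: (q.take (i - 1)).reverse := by
        conv_lhs => rw [show i = (i - 1) + 1 by omega]
        rw [List.take_add_one, List.getElem?_eq_getElem hi1q]
        simp
      rw [show (i : Int) - 1 = ((i - 1 : Nat) : Int) by
        rw [Nat.cast_sub h1i]; push_cast; ring]
      rw [pvProfile_getD q xs i hi', pvProfile_getD q xs (i - 1) (by omega)]
      rw [PySem.List.pyGetD_natCast, List.getD_eq_getElem _ _ hi1q]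
      rw [htakerev]
      show pvComb (pvM xs.reverse (q[i - 1] :: (q.take (i - 1)).reverse))
          (pvM xs.reverse ((q.take (i - 1)).reverse)) (|x - q[i - 1]|)
        = pvOMin (pvM xs.reverse (q[i - 1] :: (q.take (i - 1)).reverse))
            ((pvM xs.reverse ((q.take (i - 1)).reverse)).map (fun v => |x - q[i - 1]| + v))
      unfold pvComb
      rw [show (fun v => v + |x - q[i - 1]|) = (fun v => |x - q[i - 1]| + v) from
        funext fun v => add_comm _ _]
    · rw [if_neg hc]
      have hi0 : i = 0 := by omega
      subst hi0
      rw [pvProfile_getD q xs 0 (by omega)]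
      simp [pvM_nil_right]

theorem pvDPFold (q xs : List Int) :
    xs.foldl (pvStep q) (some 0 :: List.replicate q.length none) = pvProfile q xs := by
  induction xs using List.reverseRecOn with
  | nil => simp [pvProfileNil]
  | append_singleton ys x ih => rw [List.foldl_append, ih, List.foldl_cons, List.foldl_nil, pvStepProfile]

-- positions are increasing
theorem pvPosSorted (l c : List Char) (NN : Int) :
    (pvPosList l c NN).Pairwise (· ≤ ·) := by
  have h := PySem.List.pairwise_lt_pyRange_one 0 NN
  have h2 : (pvPosList l c NN).Pairwise (· < ·) := by
    unfold pvPosList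
    exact List.Pairwise.sublist List.filter_sublist h
  exact h2.imp le_of_lt

-- the central glue: the minimum over all permutation costs is pvM on the reversed lists
theorem pvMain (P Qf : List Int) (hP : P.Pairwise (· ≤ ·)) (hQ : Qf.Pairwise (· ≤ ·)) :
    ∃ v : Int, pvM P.reverse ((Qf.take P.length).reverse) = some v ∧
      PySem.List.min? ((PySem.List.permutations P P.length).map (fun perm => pvZC perm Qf))
        (fun x => x) = some v := by
  have hQlen : (Qf.take P.length).length ≤ P.length := by simp
  have hsome : pvM P.reverse (Qf.take P.length).reverse ≠ none := by
    intro hc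
    rw [pvM_eq_none_iff] at hc
    simp at hc
  obtain ⟨v, hv⟩ := Option.ne_none_iff_exists'.mp hsome
  refine ⟨v, hv, ?_⟩
  have hQ' : (Qf.take P.length).Pairwise (· ≤ ·) :=
    List.Pairwise.sublist (List.take_sublist _ _) hQ
  have hPd : P.reverse.Pairwise (fun a b => b ≤ a) := List.pairwise_reverse.mpr hP
  have hQd : (Qf.take P.length).reverse.Pairwise (fun a b => b ≤ a) :=
    List.pairwise_reverse.mpr hQ'
  apply pvMinChar
  · obtain ⟨σ, hσp, hσv⟩ := pvACH P.reverse (Qf.take P.length).reverse (by simpa using hQlen)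
    obtain ⟨τ, hτp, hτv⟩ := pvTransform σ (Qf.take P.length).reverse
      (by rw [hσp.length_eq]; simpa using hQlen)
    rw [List.reverse_reverse] at hτv
    have hτP : τ.Perm P := hτp.trans (hσp.trans (List.reverse_perm P))
    apply List.mem_map.mpr
    refine ⟨τ, pvPermComplete τ P hτP, ?_⟩
    rw [pvZC_take_right τ Qf, hτP.length_eq, hτv]
    rw [hv] at hσv
    exact Option.some_injective _ hσv
  · intro y hy
    obtain ⟨σ, hσmem, rfl⟩ := List.mem_map.mp hy
    have hσP : σ.Perm P := PySem.List.perm_of_mem_permutations hσmem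
    have hlσ : σ.length = P.length := hσP.length_eq
    have h1 : pvZC σ Qf = pvZC σ (Qf.take P.length) := by
      rw [pvZC_take_right σ Qf, hlσ]
    obtain ⟨τ, hτp, hτv⟩ := pvTransform σ (Qf.take P.length) (by rw [hlσ]; exact hQlen)
    have hτPr : τ.Perm P.reverse := hτp.trans (hσP.trans (List.reverse_perm P).symm)
    have hlb := pvLB P.reverse.length P.reverse (Qf.take P.length).reverse τ rfl hPd hQd
      (by simpa using hQlen) hτPr v hv
    rw [h1, ← hτv]
    exact hlb

-- B's result equals pvM on the reversed lists
theorem pvAltCore (P Qf : List Int) (v : Int)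
    (hv : pvM P.reverse ((Qf.take P.length).reverse) = some v) :
    (if P.length < Qf.length then ((P.zip Qf).map (fun pr => |pr.1 - pr.2|)).sum
     else (PySem.List.pyGetD (P.foldl (pvStep Qf) (some 0 :: List.replicate Qf.length none))
        (Qf.length : Int) none).getD 0) = v := by
  split_ifs with hlt
  · have hQl : (Qf.take P.length).length = P.length := by simp; omega
    rw [pvM_eqlen _ _ (by simp [hQl])] at hv
    have h2 : pvZC P.reverse (Qf.take P.length).reverse = pvZC P (Qf.take P.length) :=
      pvZC_rev _ _ hQl.symm
    rw [h2, ← pvZC_take_right] at hv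
    rw [pvZipMapEqZC]
    exact Option.some_injective _ hv
  · push_neg at hlt
    rw [pvDPFold]
    simp only [PySem.List.pyGetD_natCast]
    have hg : (pvProfile Qf P).getD Qf.length none
        = pvM P.reverse ((Qf.take Qf.length).reverse) := by
      unfold pvProfile
      rw [List.getD_eq_getElem _ _ (by simp)]
      simp
    rw [hg, List.take_length]
    rw [List.take_of_length_le hlt] at hv
    rw [hv]
    rfl

-- ===== VERDICT (by name: the statement is the Claim_ definition above) =====
theorem repeat_score_spec : Claim_equal_repeat_score := by
  intro w1 w2 cc _ _
  unfold Spec_repeat_score repeat_score repeat_score_alt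
  dsimp only
  simp only [pvFoldEqZC]
  obtain ⟨v, hv, hmin⟩ := pvMain
    (pvPosList (if PySem.Chars.count w1.toList cc.toList < PySem.Chars.count w2.toList cc.toList
        then w2.toList else w1.toList) cc.toList (w1.toList.length : Int))
    (pvPosList (if PySem.Chars.count w1.toList cc.toList < PySem.Chars.count w2.toList cc.toList
        then w1.toList else w2.toList) cc.toList (w1.toList.length : Int))
    (pvPosSorted _ _ _) (pvPosSorted _ _ _)
  rw [hmin, pvAltCore _ _ v hv]
  rfl
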